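-- pv_equiv track=rewrite | github.com/MrBrantCode/unitest_baseline | mut_generate/mist_train_taco/taco_8566/solution.py | can_achieve_grid
-- ===== SOURCE A (Python) =====
-- def can_achieve_grid(n: int, m: int, grid: list) -> str:
--     def findInArray(c, arr):
--         ind = []
--         for i in range(len(arr)):
--             if arr[i] == c:
--                 ind.append(i)
--         return ind
--
--     rows = [0] * n
--     cols = [0] * m
--     counter = 1
--
--     for i in range(n):
--         for j in range(m):
--             if grid[i][j] == '#':
--                 if rows[i] == 0 and cols[j] == 0:
--                     rows[i] = counter
--                     cols[j] = counter
--                     counter += 1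
--                 else:
--                     if (rows[i] != 0 and cols[j] != 0) and rows[i] != cols[j]:
--                         return 'No'
--                     c = max(rows[i], cols[j])
--                     rows[i] = c
--                     cols[j] = c
--
--     for c in range(1, counter):
--         rowsEqualToC = findInArray(c, rows)
--         colsEqualToC = findInArray(c, cols)
--         for i in rowsEqualToC:
--             for j in colsEqualToC:
--                 if grid[i][j] != '#':
--                     return 'No'
--
--     return 'Yes'
-- ===== SOURCE B (Python) =====
-- def can_achieve_grid(n: int, m: int, grid: list) -> str:
--     pats = [[grid[i][j] == '#' for j in range(m)] for i in range(n)]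
--     for j in range(m):
--         hits = [p for p in pats if p[j]]
--         if hits and any(p != hits[0] for p in hits):
--             return 'No'
--     return 'Yes'
-- ===== Notes on version B (the rewrite author's own statement) =====
-- stated objective: alternative
-- what changed: B drops A's greedy label-propagation (rows/cols label arrays, counter, max-merge, then per-label rescans) entirely and instead checks the equivalent rectangle criterion directly: any two rows sharing a '#' column must have identical '#' patterns, verified column by column over precomputed boolean row patterns.
-- outside the precondition, e.g. on can_achieve_grid(3, 3, [['#', '.', '.'], ['.', '#', '.'], ['#', '#']]): A returns 'No', B raises IndexError
import Mathlib
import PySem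

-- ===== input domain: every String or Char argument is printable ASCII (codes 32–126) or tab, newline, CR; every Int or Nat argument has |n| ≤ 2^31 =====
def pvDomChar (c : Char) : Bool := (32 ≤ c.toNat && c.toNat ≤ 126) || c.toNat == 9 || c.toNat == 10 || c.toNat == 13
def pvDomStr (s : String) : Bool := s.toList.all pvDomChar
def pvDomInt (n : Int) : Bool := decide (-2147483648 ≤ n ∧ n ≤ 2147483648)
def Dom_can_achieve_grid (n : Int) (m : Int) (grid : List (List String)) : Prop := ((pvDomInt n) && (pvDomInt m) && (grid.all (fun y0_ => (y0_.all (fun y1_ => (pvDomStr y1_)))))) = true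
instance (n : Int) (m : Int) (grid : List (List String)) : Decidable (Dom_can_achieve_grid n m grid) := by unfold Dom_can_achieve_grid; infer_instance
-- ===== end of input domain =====

-- B drops A's greedy labeling (rows/cols label arrays, counter, max-merge, per-label rescans) and
-- instead checks directly, column by column over precomputed boolean row patterns, that any two rows
-- sharing a '#' column have identical patterns; the file proves the two criteria agree.

-- grid[i][j]; exact under Pre_ (both indices in range and nonnegative there)
def pvCell (grid : List (List String)) (i j : Int) : String :=
  PySem.List.pyGetD (PySem.List.pyGetD grid i []) j ""

-- ===== PORT A =====
def findInArray (c : Int) (arr : List Int) : List Int :=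
  (PySem.List.pyRange 0 (arr.length : Int) 1).foldl
    (fun ind i => if PySem.List.pyGetD arr i 0 == c then ind ++ [i] else ind) []

-- inner 'for j in range(m)' of A's labeling loop; none = the early 'return "No"'
def pvLoopJ (grid : List (List String)) (i : Int) (js : List Int)
    (st : List Int × List Int × Int) : Option (List Int × List Int × Int) :=
  match js with
  | [] => some st
  | j :: js =>
    let (rows, cols, counter) := st
    if pvCell grid i j == "#" then
      let ri := PySem.List.pyGetD rows i 0
      let cj := PySem.List.pyGetD cols j 0
      if ri == 0 && cj == 0 then
        pvLoopJ grid i js (PySem.List.pySetD rows i counter, PySem.List.pySetD cols j counter, counter + 1)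
      else if (ri != 0 && cj != 0) && ri != cj then none
      else
        let c := max ri cj
        pvLoopJ grid i js (PySem.List.pySetD rows i c, PySem.List.pySetD cols j c, counter)
    else pvLoopJ grid i js st

-- outer 'for i in range(n)' of A's labeling loop
def pvLoopI (grid : List (List String)) (m : Int) (is : List Int)
    (st : List Int × List Int × Int) : Option (List Int × List Int × Int) :=
  match is with
  | [] => some st
  | i :: is =>
    match pvLoopJ grid i (PySem.List.pyRange 0 m 1) st with
    | none => none
    | some st' => pvLoopI grid m is st'

-- 'for c in range(1, counter)' verification of A, rescanning rows/cols per label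
def pvPhase2A (grid : List (List String)) (rows cols : List Int) (cs : List Int) : String :=
  match cs with
  | [] => "Yes"
  | c :: cs =>
    let ris := findInArray c rows
    let cjs := findInArray c cols
    if ris.any (fun i => cjs.any (fun j => !(pvCell grid i j == "#"))) then "No"
    else pvPhase2A grid rows cols cs

def can_achieve_grid (n : Int) (m : Int) (grid : List (List String)) : String :=
  match pvLoopI grid m (PySem.List.pyRange 0 n 1)
      (List.replicate n.toNat 0, List.replicate m.toNat 0, 1) with
  | none => "No"
  | some (rows, cols, counter) => pvPhase2A grid rows cols (PySem.List.pyRange 1 counter 1)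

-- ===== PORT B =====
-- pats[i] = [grid[i][j] == '#' for j in range(m)]
def pvPat (grid : List (List String)) (m : Int) (i : Int) : List Bool :=
  (PySem.List.pyRange 0 m 1).map (fun j => pvCell grid i j == "#")

-- 'for j in range(m): hits = [p for p in pats if p[j]]; if hits and any(p != hits[0] for p in hits): return "No"'
def pvColCheck (pats : List (List Bool)) (js : List Int) : String :=
  match js with
  | [] => "Yes"
  | j :: js =>
    let hits := pats.filter (fun p => PySem.List.pyGetD p j false)
    match hits with
    | [] => pvColCheck pats js
    | h :: _ => if hits.any (fun p => !(p == h)) then "No" else pvColCheck pats js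

def can_achieve_grid_alt (n : Int) (m : Int) (grid : List (List String)) : String :=
  pvColCheck ((PySem.List.pyRange 0 n 1).map (pvPat grid m)) (PySem.List.pyRange 0 m 1)

-- ===== PRECONDITION & SPEC =====
-- Pre_ excludes grids too short for n or with a row among the first n shorter than m: there A usually
-- raises IndexError, though it may return 'No' early when a conflict precedes the out-of-range cell
-- (see the cited example; B raises IndexError there).
def Pre_can_achieve_grid (n : Int) (m : Int) (grid : List (List String)) : Prop :=
  (0 < n ∧ 0 < m) → ((n ≤ (grid.length : Int)) ∧ ∀ row ∈ grid.take n.toNat, m ≤ (row.length : Int))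
instance (n : Int) (m : Int) (grid : List (List String)) : Decidable (Pre_can_achieve_grid n m grid) := by
  unfold Pre_can_achieve_grid; infer_instance

def pvWitness_can_achieve_grid : Int × Int × List (List String) :=
  (2, 2, [["#", "."], [".", "#"]])

def Spec_can_achieve_grid (n : Int) (m : Int) (grid : List (List String)) (out : String) : Prop := out = can_achieve_grid_alt n m grid
instance (n : Int) (m : Int) (grid : List (List String)) (out : String) : Decidable (Spec_can_achieve_grid n m grid out) := by unfold Spec_can_achieve_grid; infer_instance

-- ===== CLAIM (what is proved, stated in full; the proofs are below) =====
def Claim_equal_can_achieve_grid : Prop := ∀ (n : Int) (m : Int) (grid : List (List String)), Dom_can_achieve_grid n m grid → Pre_can_achieve_grid n m grid → Spec_can_achieve_grid n m grid (can_achieve_grid n m grid)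

-- ===== LEMMAS AND PROOFS =====

-- proof-only abbreviations
def gI (l : List Int) (i : Int) : Int := PySem.List.pyGetD l i 0

def pvH (grid : List (List String)) (i j : Int) : Bool := pvCell grid i j == "#"

def pvSetAll (cols : List Int) (js : List Int) (v : Int) : List Int :=
  js.foldl (fun cs j => PySem.List.pySetD cs j v) cols

-- the rectangle criterion B checks: rows sharing a '#' column have equal patterns
def pvP (n m : Int) (grid : List (List String)) : Prop :=
  ∀ i1 i2 j : Int, 0 ≤ i1 → i1 < n → 0 ≤ i2 → i2 < n → 0 ≤ j → j < m →
    pvH grid i1 j = true → pvH grid i2 j = true → pvPat grid m i1 = pvPat grid m i2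

-- invariant of A's labeling loop after the first `done` rows
def pvInv (grid : List (List String)) (n m done : Int)
    (rows cols : List Int) (counter : Int) : Prop :=
  rows.length = n.toNat ∧ cols.length = m.toNat ∧ 1 ≤ counter ∧
  (∀ i, done ≤ i → gI rows i = 0) ∧
  (∀ i, 0 ≤ i → 0 ≤ gI rows i ∧ gI rows i < counter) ∧
  (∀ j, 0 ≤ j → 0 ≤ gI cols j ∧ gI cols j < counter) ∧
  (∀ i, 0 ≤ i → i < done → (gI rows i ≠ 0 ↔ ∃ j, 0 ≤ j ∧ j < m ∧ pvH grid i j = true)) ∧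
  (∀ j, 0 ≤ j → j < m → (gI cols j ≠ 0 ↔ ∃ i, 0 ≤ i ∧ i < done ∧ pvH grid i j = true)) ∧
  (∀ i j, 0 ≤ i → i < done → 0 ≤ j → j < m → pvH grid i j = true → gI cols j = gI rows i)

-- processed rows with equal nonzero labels have equal patterns
def pvInj (grid : List (List String)) (m done : Int) (rows : List Int) : Prop :=
  ∀ i1 i2, 0 ≤ i1 → i1 < done → 0 ≤ i2 → i2 < done →
    gI rows i1 = gI rows i2 → gI rows i1 ≠ 0 → pvPat grid m i1 = pvPat grid m i2

theorem gI_set_eq (l : List Int) (i v : Int) (h0 : 0 ≤ i) (h1 : i < (l.length : Int)) :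
    gI (PySem.List.pySetD l i v) i = v := by
  rw [gI, PySem.List.pySetD_of_nonneg _ _ h0, PySem.List.pyGetD_of_nonneg _ _ h0]
  rw [List.getD_eq_getElem?_getD, List.getElem?_set_self (by omega)]
  simp

theorem gI_set_ne (l : List Int) (i v k : Int) (h0 : 0 ≤ i) (hk : 0 ≤ k) (hne : k ≠ i) :
    gI (PySem.List.pySetD l i v) k = gI l k := by
  rw [gI, gI, PySem.List.pySetD_of_nonneg _ _ h0, PySem.List.pyGetD_of_nonneg _ _ hk,
    PySem.List.pyGetD_of_nonneg _ _ hk]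
  rw [List.getD_eq_getElem?_getD, List.getD_eq_getElem?_getD, List.getElem?_set_ne (by omega)]

theorem pySetD_self (l : List Int) (i v : Int) (h0 : 0 ≤ i) (hv : gI l i = v) :
    PySem.List.pySetD l i v = l := by
  rw [PySem.List.pySetD_of_nonneg _ _ h0]
  by_cases h : i.toNat < l.length
  · rw [gI, PySem.List.pyGetD_of_nonneg _ _ h0, List.getD_eq_getElem?_getD,
      List.getElem?_eq_getElem h] at hv
    simp at hv
    rw [← hv]
    exact List.set_getElem_self h
  · exact List.set_eq_of_length_le (by omega)

theorem gI_replicate (n : Nat) (i : Int) : gI (List.replicate n 0) i = 0 := by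
  unfold gI
  simp only [PySem.List.pyGetD, PySem.List.pyGet?, PySem.List.pyIdx?]
  split_ifs <;> simp [List.getElem?_replicate] <;> split_ifs <;> simp

theorem length_pvSetAll (cols js : List Int) (v : Int) :
    (pvSetAll cols js v).length = cols.length := by
  induction js generalizing cols with
  | nil => rfl
  | cons j js ih => simp [pvSetAll, List.foldl_cons] at ih ⊢; rw [ih, PySem.List.length_pySetD]

theorem gI_pvSetAll (cols js : List Int) (v k : Int)
    (hjs : ∀ j ∈ js, 0 ≤ j ∧ j < (cols.length : Int)) (hk : 0 ≤ k) :
    gI (pvSetAll cols js v) k = if k ∈ js then v else gI cols k := by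
  induction js generalizing cols with
  | nil => simp [pvSetAll]
  | cons j js ih =>
    have hj := hjs j (List.mem_cons_self ..)
    have hrec := ih (PySem.List.pySetD cols j v)
      (fun x hx => by rw [PySem.List.length_pySetD]; exact hjs x (List.mem_cons_of_mem _ hx))
    simp only [pvSetAll, List.foldl_cons] at hrec ⊢
    rw [hrec]
    by_cases hkj : k = j
    · subst hkj
      by_cases hmem : k ∈ js
      · simp [hmem]
      · simp [hmem, gI_set_eq cols k v hk hj.2]
    · by_cases hmem : k ∈ js
      · simp [hmem]
      · simp [hmem, hkj, gI_set_ne cols j v k hj.1 hk hkj]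

theorem gI_pat (grid : List (List String)) (m i j : Int) (h0 : 0 ≤ j) (h1 : j < m) :
    PySem.List.pyGetD (pvPat grid m i) j false = pvH grid i j := by
  unfold pvPat pvH
  exact PySem.List.pyGetD_map_pyRange_of_nonneg _ _ _ _ h0 h1

theorem pat_eq_iff (grid : List (List String)) (m i1 i2 : Int) :
    pvPat grid m i1 = pvPat grid m i2 ↔
      ∀ j, 0 ≤ j → j < m → pvH grid i1 j = pvH grid i2 j := by
  unfold pvPat pvH
  rw [List.map_inj_left]
  constructor
  · intro h j hj0 hjm; exact h j (PySem.List.mem_pyRange_one.2 ⟨hj0, hjm⟩)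
  · intro h j hj; have := PySem.List.mem_pyRange_one.1 hj; exact h j this.1 this.2

theorem all_congr_mem' {α : Type} (l : List α) (f g : α → Bool) (h : ∀ x ∈ l, f x = g x) :
    l.all f = l.all g := by
  rw [List.all_eq_not_any_not, List.all_eq_not_any_not,
    PySem.List.any_congr_mem (fun x hx => by rw [h x hx])]



theorem loopJ_set (grid : List (List String)) (i : Int) (js : List Int)
    (rows cols : List Int) (counter r : Int)
    (hnd : js.Nodup) (hjs : ∀ j ∈ js, 0 ≤ j ∧ j < (cols.length : Int))
    (hi : 0 ≤ i) (hr : gI rows i = r) (hrpos : 0 < r)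
    (hc0 : ∀ j ∈ js, 0 ≤ gI cols j) :
    pvLoopJ grid i js (rows, cols, counter) =
      if js.all (fun j => !(pvH grid i j) || gI cols j == 0 || gI cols j == r)
      then some (rows, pvSetAll cols (js.filter (fun j => pvH grid i j)) r, counter)
      else none := by
  induction js generalizing cols with
  | nil => simp [pvLoopJ, pvSetAll]
  | cons j js ih =>
    have hj := hjs j (List.mem_cons_self ..)
    have hcj0 := hc0 j (List.mem_cons_self ..)
    have hndt : js.Nodup := hnd.of_cons
    have hjnot : j ∉ js := (List.nodup_cons.1 hnd).1
    have hri : PySem.List.pyGetD rows i 0 = r := hr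
    -- the recursive step after a successful write of r at column j
    have step : ∀ (hHj : pvH grid i j = true) (hcnd : gI cols j = 0 ∨ gI cols j = r),
        pvLoopJ grid i js (rows, PySem.List.pySetD cols j r, counter) =
          if (j :: js).all (fun x => !(pvH grid i x) || gI cols x == 0 || gI cols x == r)
          then some (rows, pvSetAll cols ((j :: js).filter (fun x => pvH grid i x)) r, counter)
          else none := by
      intro hHj hcnd
      rw [ih (PySem.List.pySetD cols j r) hndt
        (fun x hx => by rw [PySem.List.length_pySetD]; exact hjs x (List.mem_cons_of_mem _ hx))
        (fun x hx => by
          rw [gI_set_ne cols j r x hj.1 (hjs x (List.mem_cons_of_mem _ hx)).1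
            (fun he => hjnot (he ▸ hx))]
          exact hc0 x (List.mem_cons_of_mem _ hx))]
      have hcongr : ∀ x ∈ js,
          (!(pvH grid i x) || gI (PySem.List.pySetD cols j r) x == 0 || gI (PySem.List.pySetD cols j r) x == r)
          = (!(pvH grid i x) || gI cols x == 0 || gI cols x == r) := by
        intro x hx
        rw [gI_set_ne cols j r x hj.1 (hjs x (List.mem_cons_of_mem _ hx)).1
          (fun he => hjnot (he ▸ hx))]
      rw [all_congr_mem' _ _ _ hcongr]
      have hjt : (!(pvH grid i j) || gI cols j == 0 || gI cols j == r) = true := by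
        rcases hcnd with h | h <;> simp [h]
      simp only [List.all_cons, hjt, Bool.true_and]
      simp only [List.filter_cons, hHj, if_true]
      rfl
    simp only [pvLoopJ]
    by_cases hH : (pvCell grid i j == "#") = true
    · simp only [hH, if_true]
      by_cases hcz : PySem.List.pyGetD cols j 0 = 0
      · -- cj = 0 : no conflict, c = max r 0 = r
        have e1 : (PySem.List.pyGetD rows i 0 == 0 && PySem.List.pyGetD cols j 0 == 0) = false := by
          rw [hri]; simp; omega
        have e2 : ((PySem.List.pyGetD rows i 0 != 0 && PySem.List.pyGetD cols j 0 != 0)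
            && PySem.List.pyGetD rows i 0 != PySem.List.pyGetD cols j 0) = false := by
          rw [hri, hcz]; simp
        have e3 : max (PySem.List.pyGetD rows i 0) (PySem.List.pyGetD cols j 0) = r := by
          rw [hri, hcz]; omega
        simp only [e1, e2, e3, Bool.false_eq_true, if_false]
        rw [pySetD_self rows i r hi hr]
        exact step (by simpa [pvH] using hH) (Or.inl (by simpa [gI] using hcz))
      · by_cases hcr : PySem.List.pyGetD cols j 0 = r
        · -- cj = r : no conflict
          have e1 : (PySem.List.pyGetD rows i 0 == 0 && PySem.List.pyGetD cols j 0 == 0) = false := by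
            rw [hri]; simp; omega
          have e2 : ((PySem.List.pyGetD rows i 0 != 0 && PySem.List.pyGetD cols j 0 != 0)
              && PySem.List.pyGetD rows i 0 != PySem.List.pyGetD cols j 0) = false := by
            rw [hri, hcr]; simp
          have e3 : max (PySem.List.pyGetD rows i 0) (PySem.List.pyGetD cols j 0) = r := by
            rw [hri, hcr]; omega
          simp only [e1, e2, e3, Bool.false_eq_true, if_false]
          rw [pySetD_self rows i r hi hr]
          exact step (by simpa [pvH] using hH) (Or.inr (by simpa [gI] using hcr))
        · -- cj ∉ {0, r} : conflict, both sides none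
          have e1 : (PySem.List.pyGetD rows i 0 == 0 && PySem.List.pyGetD cols j 0 == 0) = false := by
            rw [hri]; simp; omega
          have e2 : ((PySem.List.pyGetD rows i 0 != 0 && PySem.List.pyGetD cols j 0 != 0)
              && PySem.List.pyGetD rows i 0 != PySem.List.pyGetD cols j 0) = true := by
            rw [hri]; simp [bne]
            exact ⟨⟨by omega, hcz⟩, fun h => hcr h.symm⟩
          simp only [e1, e2, Bool.false_eq_true, if_false, if_true]
          have hjf : (!(pvH grid i j) || gI cols j == 0 || gI cols j == r) = false := by
            have hHt : pvH grid i j = true := by simpa [pvH] using hH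
            simp [hHt, gI, hcz, hcr]
          simp [List.all_cons, hjf]
    · -- not '#': skip
      simp only [hH, Bool.false_eq_true, if_false]
      rw [ih cols hndt (fun x hx => hjs x (List.mem_cons_of_mem _ hx))
        (fun x hx => hc0 x (List.mem_cons_of_mem _ hx))]
      have hHf : (pvH grid i j) = false := by simpa [pvH] using hH
      simp [List.all_cons, List.filter_cons, hHf]


theorem loopJ_unset (grid : List (List String)) (i : Int) (js : List Int)
    (rows cols : List Int) (counter : Int)
    (hnd : js.Nodup) (hjs : ∀ j ∈ js, 0 ≤ j ∧ j < (cols.length : Int))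
    (hi : 0 ≤ i) (hil : i < (rows.length : Int))
    (hr : gI rows i = 0) (hcnt : 0 < counter)
    (hc0 : ∀ j ∈ js, 0 ≤ gI cols j) :
    pvLoopJ grid i js (rows, cols, counter) =
      match js.filter (fun j => pvH grid i j) with
      | [] => some (rows, cols, counter)
      | j0 :: rest =>
        let v := if gI cols j0 = 0 then counter else gI cols j0
        if rest.all (fun j => gI cols j == 0 || gI cols j == v)
        then some (PySem.List.pySetD rows i v, pvSetAll cols (j0 :: rest) v,
                   if gI cols j0 = 0 then counter + 1 else counter)
        else none := by
  induction js with
  | nil => simp [pvLoopJ]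
  | cons j js ih =>
    have hj := hjs j (List.mem_cons_self ..)
    have hcj0 := hc0 j (List.mem_cons_self ..)
    have hndt : js.Nodup := hnd.of_cons
    have hjnot : j ∉ js := (List.nodup_cons.1 hnd).1
    have hri : PySem.List.pyGetD rows i 0 = 0 := hr
    simp only [pvLoopJ]
    by_cases hH : (pvCell grid i j == "#") = true
    · have hHt : pvH grid i j = true := by simpa [pvH] using hH
      simp only [hH, if_true, List.filter_cons, hHt]
      by_cases hcz : gI cols j = 0
      · -- fresh label counter
        have e1 : (PySem.List.pyGetD rows i 0 == 0 && PySem.List.pyGetD cols j 0 == 0) = true := by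
          rw [hri, show PySem.List.pyGetD cols j 0 = gI cols j from rfl, hcz]; simp
        simp only [e1, if_true]
        have hset := loopJ_set grid i js (PySem.List.pySetD rows i counter)
          (PySem.List.pySetD cols j counter) (counter + 1) counter hndt
          (fun x hx => by rw [PySem.List.length_pySetD]; exact hjs x (List.mem_cons_of_mem _ hx))
          hi (gI_set_eq rows i counter hi hil) hcnt
          (fun x hx => by
            rw [gI_set_ne cols j counter x hj.1 (hjs x (List.mem_cons_of_mem _ hx)).1
              (fun he => hjnot (he ▸ hx))]
            exact hc0 x (List.mem_cons_of_mem _ hx))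
        rw [hset]
        have hv : (if gI cols j = 0 then counter else gI cols j) = counter := by simp [hcz]
        have hA : (js.all fun x => !(pvH grid i x) || gI (PySem.List.pySetD cols j counter) x == 0
              || gI (PySem.List.pySetD cols j counter) x == counter)
            = ((js.filter (fun x => pvH grid i x)).all
                fun x => gI cols x == 0 || gI cols x == counter) := by
          rw [all_congr_mem' _ _ (fun x => !(pvH grid i x) || gI cols x == 0 || gI cols x == counter)
            (fun x hx => by
              rw [gI_set_ne cols j counter x hj.1 (hjs x (List.mem_cons_of_mem _ hx)).1
                (fun he => hjnot (he ▸ hx))])]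
          rw [List.all_filter]
          apply all_congr_mem'
          intro x hx
          by_cases h : pvH grid i x = true <;> simp [h]
        simp only [hv, hA, if_pos hcz]
        rfl
      · -- adopt the column's label
        have hcjv : 0 < gI cols j := by omega
        have e1 : (PySem.List.pyGetD rows i 0 == 0 && PySem.List.pyGetD cols j 0 == 0) = false := by
          rw [hri, show PySem.List.pyGetD cols j 0 = gI cols j from rfl]; simp; omega
        have e2 : ((PySem.List.pyGetD rows i 0 != 0 && PySem.List.pyGetD cols j 0 != 0)
            && PySem.List.pyGetD rows i 0 != PySem.List.pyGetD cols j 0) = false := by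
          rw [hri]; simp
        have e3 : max (PySem.List.pyGetD rows i 0) (PySem.List.pyGetD cols j 0) = gI cols j := by
          rw [hri, show PySem.List.pyGetD cols j 0 = gI cols j from rfl]; omega
        simp only [e1, e2, e3, Bool.false_eq_true, if_false]
        have hset := loopJ_set grid i js (PySem.List.pySetD rows i (gI cols j))
          (PySem.List.pySetD cols j (gI cols j)) counter (gI cols j) hndt
          (fun x hx => by rw [PySem.List.length_pySetD]; exact hjs x (List.mem_cons_of_mem _ hx))
          hi (gI_set_eq rows i _ hi hil) hcjv
          (fun x hx => by
            rw [gI_set_ne cols j _ x hj.1 (hjs x (List.mem_cons_of_mem _ hx)).1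
              (fun he => hjnot (he ▸ hx))]
            exact hc0 x (List.mem_cons_of_mem _ hx))
        rw [hset]
        have hv : (if gI cols j = 0 then counter else gI cols j) = gI cols j := by simp [hcz]
        have hA : (js.all fun x => !(pvH grid i x) || gI (PySem.List.pySetD cols j (gI cols j)) x == 0
              || gI (PySem.List.pySetD cols j (gI cols j)) x == gI cols j)
            = ((js.filter (fun x => pvH grid i x)).all
                fun x => gI cols x == 0 || gI cols x == gI cols j) := by
          rw [all_congr_mem' _ _ (fun x => !(pvH grid i x) || gI cols x == 0 || gI cols x == gI cols j)
            (fun x hx => by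
              rw [gI_set_ne cols j _ x hj.1 (hjs x (List.mem_cons_of_mem _ hx)).1
                (fun he => hjnot (he ▸ hx))])]
          rw [List.all_filter]
          apply all_congr_mem'
          intro x hx
          by_cases h : pvH grid i x = true <;> simp [h]
        have hcself : PySem.List.pySetD cols j (gI cols j) = cols :=
          pySetD_self cols j _ hj.1 rfl
        simp only [hv, hA, if_neg hcz]
        rw [show pvSetAll cols (j :: js.filter (fun x => pvH grid i x)) (gI cols j)
            = pvSetAll (PySem.List.pySetD cols j (gI cols j)) (js.filter (fun x => pvH grid i x)) (gI cols j)
          from rfl]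
    · have hHf : pvH grid i j = false := by simpa [pvH] using hH
      simp only [hH, Bool.false_eq_true, if_false, List.filter_cons, hHf]
      exact ih hndt (fun x hx => hjs x (List.mem_cons_of_mem _ hx))
        (fun x hx => hc0 x (List.mem_cons_of_mem _ hx))

theorem invSucc (grid : List (List String)) (n m done : Int) (rows cols : List Int)
    (counter counter' v : Int) (hs : List Int)
    (hInv : pvInv grid n m done rows cols counter)
    (hd0 : 0 ≤ done) (hdn : done < n)
    (hhs : ∀ j, j ∈ hs ↔ (0 ≤ j ∧ j < m ∧ pvH grid done j = true))
    (hne : hs ≠ [])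
    (hv : 0 < v) (hv' : v < counter') (hcc : counter ≤ counter')
    (hvcols : ∀ j ∈ hs, gI cols j = 0 ∨ gI cols j = v) :
    pvInv grid n m (done + 1) (PySem.List.pySetD rows done v) (pvSetAll cols hs v) counter' := by
  obtain ⟨hL1, hL2, hL3, hL4, hL5, hL6, hL7, hL8, hL9⟩ := hInv
  have hdl : done < (rows.length : Int) := by rw [hL1]; omega
  have hhsb : ∀ j ∈ hs, 0 ≤ j ∧ j < (cols.length : Int) := by
    intro j hj
    have h := (hhs j).1 hj
    have hm0 : 0 < m := by omega
    constructor
    · exact h.1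
    · rw [hL2]; omega
  have hrow : ∀ i, 0 ≤ i → gI (PySem.List.pySetD rows done v) i
      = if i = done then v else gI rows i := by
    intro i hi
    by_cases h : i = done
    · subst h; simp [gI_set_eq rows i v hd0 hdl]
    · simp [h, gI_set_ne rows done v i hd0 hi h]
  have hcol : ∀ j, 0 ≤ j → gI (pvSetAll cols hs v) j
      = if j ∈ hs then v else gI cols j := fun j hj => gI_pvSetAll cols hs v j hhsb hj
  refine ⟨by rw [PySem.List.length_pySetD]; exact hL1,
          by rw [length_pvSetAll]; exact hL2, by omega, ?_, ?_, ?_, ?_, ?_, ?_⟩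
  · -- unprocessed rows still 0
    intro i hi
    have hi0 : 0 ≤ i := by omega
    rw [hrow i hi0, if_neg (by omega)]
    exact hL4 i (by omega)
  · -- row label bounds
    intro i hi
    rw [hrow i hi]
    by_cases h : i = done
    · simp [h]; omega
    · have := hL5 i hi; simp [h]; omega
  · -- col label bounds
    intro j hj
    rw [hcol j hj]
    by_cases h : j ∈ hs
    · simp [h]; omega
    · have := hL6 j hj; simp [h]; omega
  · -- C7
    intro i hi hid
    rw [hrow i hi]
    by_cases h : i = done
    · subst h
      rw [if_pos rfl]
      constructor
      · intro _
        obtain ⟨j0, hj0⟩ := List.exists_mem_of_ne_nil hs hne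
        have := (hhs j0).1 hj0
        exact ⟨j0, this.1, this.2.1, this.2.2⟩
      · intro _; omega
    · rw [if_neg h]
      exact hL7 i hi (by omega)
  · -- C8
    intro j hj hjm
    rw [hcol j hj]
    by_cases h : j ∈ hs
    · rw [if_pos h]
      constructor
      · intro _
        exact ⟨done, hd0, by omega, ((hhs j).1 h).2.2⟩
      · intro _; omega
    · rw [if_neg h]
      rw [hL8 j hj hjm]
      constructor
      · rintro ⟨i, hi0, hid, hH⟩; exact ⟨i, hi0, by omega, hH⟩
      · rintro ⟨i, hi0, hid, hH⟩
        refine ⟨i, hi0, ?_, hH⟩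
        rcases lt_or_eq_of_le (by omega : i ≤ done) with hlt | heq
        · omega
        · exfalso; exact h ((hhs j).2 ⟨hj, hjm, heq ▸ hH⟩)
  · -- C9
    intro i j hi hid hj hjm hH
    rw [hrow i hi, hcol j hj]
    by_cases h : i = done
    · subst h
      rw [if_pos rfl, if_pos ((hhs j).2 ⟨hj, hjm, hH⟩)]
    · rw [if_neg h]
      have hid' : i < done := by omega
      have hc9 := hL9 i j hi hid' hj hjm hH
      have hrne : gI rows i ≠ 0 := by
        rw [(hL7 i hi hid')]; exact ⟨j, hj, hjm, hH⟩
      by_cases hmem : j ∈ hs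
      · rw [if_pos hmem]
        rcases hvcols j hmem with h0 | hv0
        · exfalso; rw [hc9] at h0; exact hrne h0
        · rw [← hv0, hc9]
      · rw [if_neg hmem]; exact hc9

theorem invSkip (grid : List (List String)) (n m done : Int) (rows cols : List Int)
    (counter : Int)
    (hInv : pvInv grid n m done rows cols counter)
    (hd0 : 0 ≤ done)
    (hemp : ∀ j, 0 ≤ j → j < m → pvH grid done j = false) :
    pvInv grid n m (done + 1) rows cols counter := by
  obtain ⟨hL1, hL2, hL3, hL4, hL5, hL6, hL7, hL8, hL9⟩ := hInv
  refine ⟨hL1, hL2, hL3, fun i hi => hL4 i (by omega), hL5, hL6, ?_, ?_, ?_⟩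
  · intro i hi hid
    by_cases h : i = done
    · subst h
      rw [hL4 i (le_refl i)]
      constructor
      · intro h0; exact absurd rfl h0
      · rintro ⟨j, hj0, hjm, hH⟩
        rw [hemp j hj0 hjm] at hH; exact absurd hH (by simp)
    · exact hL7 i hi (by omega)
  · intro j hj hjm
    rw [hL8 j hj hjm]
    constructor
    · rintro ⟨i, hi0, hid, hH⟩; exact ⟨i, hi0, by omega, hH⟩
    · rintro ⟨i, hi0, hid, hH⟩
      refine ⟨i, hi0, ?_, hH⟩
      by_cases h : i = done
      · subst h; rw [hemp j hj hjm] at hH; exact absurd hH (by simp)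
      · omega
  · intro i j hi hid hj hjm hH
    by_cases h : i = done
    · subst h; rw [hemp j hj hjm] at hH; exact absurd hH (by simp)
    · exact hL9 i j hi (by omega) hj hjm hH

-- common setup facts for a row step
theorem rowSetup (grid : List (List String)) (n m done : Int) (rows cols : List Int)
    (counter : Int) (hInv : pvInv grid n m done rows cols counter)
    (hd0 : 0 ≤ done) (hdn : done < n) :
    pvLoopJ grid done (PySem.List.pyRange 0 m 1) (rows, cols, counter) =
      match (PySem.List.pyRange 0 m 1).filter (fun j => pvH grid done j) with
      | [] => some (rows, cols, counter)
      | j0 :: rest =>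
        let v := if gI cols j0 = 0 then counter else gI cols j0
        if rest.all (fun j => gI cols j == 0 || gI cols j == v)
        then some (PySem.List.pySetD rows done v, pvSetAll cols (j0 :: rest) v,
                   if gI cols j0 = 0 then counter + 1 else counter)
        else none := by
  obtain ⟨hL1, hL2, hL3, hL4, hL5, hL6, hL7, hL8, hL9⟩ := hInv
  apply loopJ_unset
  · exact PySem.List.nodup_pyRange_one 0 m
  · intro j hj
    have := PySem.List.mem_pyRange_one.1 hj
    exact ⟨this.1, by rw [hL2]; omega⟩
  · exact hd0
  · rw [hL1]; omega
  · exact hL4 done (le_refl done)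
  · omega
  · intro j hj
    exact (hL6 j (PySem.List.mem_pyRange_one.1 hj).1).1

theorem mem_hs_iff (grid : List (List String)) (m done j : Int) :
    j ∈ (PySem.List.pyRange 0 m 1).filter (fun j => pvH grid done j) ↔
      (0 ≤ j ∧ j < m ∧ pvH grid done j = true) := by
  rw [List.mem_filter, PySem.List.mem_pyRange_one]
  tauto

theorem loopI_some (grid : List (List String)) (n m : Int) :
    ∀ (is : List Int) (done : Int) (rows cols : List Int) (counter : Int)
      (st' : List Int × List Int × Int),
      is = PySem.List.pyRange done n 1 → 0 ≤ done → done ≤ n →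
      pvInv grid n m done rows cols counter →
      pvLoopI grid m is (rows, cols, counter) = some st' →
      pvInv grid n m n st'.1 st'.2.1 st'.2.2 := by
  intro is
  induction is with
  | nil =>
    intro done rows cols counter st' hrange hd0 hdn hInv hrun
    have hnd : n ≤ done := by
      by_contra h
      rw [PySem.List.pyRange_one_cons (by omega)] at hrange
      exact List.cons_ne_nil _ _ hrange.symm
    have : done = n := by omega
    subst this
    simp only [pvLoopI] at hrun
    obtain rfl := Option.some_injective _ hrun
    exact hInv
  | cons i is ih =>
    intro done rows cols counter st' hrange hd0 hdn hInv hrun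
    have hlt : done < n := by
      by_contra h
      rw [PySem.List.pyRange_one_eq_nil (by omega)] at hrange
      exact List.cons_ne_nil _ _ hrange
    rw [PySem.List.pyRange_one_cons hlt] at hrange
    have h12 := List.cons_eq_cons.1 hrange
    have h1 : i = done := h12.1
    have h2 : is = PySem.List.pyRange (done + 1) n 1 := h12.2
    subst h2
    simp only [pvLoopI] at hrun
    rw [h1] at hrun
    rw [rowSetup grid n m done rows cols counter hInv hd0 hlt] at hrun
    cases hfil : (PySem.List.pyRange 0 m 1).filter (fun j => pvH grid done j) with
    | nil =>
      rw [hfil] at hrun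
      simp only at hrun
      have hemp : ∀ j, 0 ≤ j → j < m → pvH grid done j = false := by
        intro j hj0 hjm
        by_contra h
        have : j ∈ (PySem.List.pyRange 0 m 1).filter (fun j => pvH grid done j) :=
          (mem_hs_iff grid m done j).2 ⟨hj0, hjm, by simpa using h⟩
        rw [hfil] at this
        exact absurd this (List.not_mem_nil)
      exact ih (done + 1) rows cols counter st' rfl (by omega) (by omega)
        (invSkip grid n m done rows cols counter hInv hd0 hemp) hrun
    | cons j0 rest =>
      rw [hfil] at hrun
      simp only at hrun
      by_cases hcond : (rest.all (fun j => gI cols j == 0 ||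
          gI cols j == if gI cols j0 = 0 then counter else gI cols j0)) = true
      · rw [if_pos hcond] at hrun
        obtain ⟨hL1, hL2, hL3, hL4, hL5, hL6, hL7, hL8, hL9⟩ := hInv
        have hj0mem : j0 ∈ (PySem.List.pyRange 0 m 1).filter (fun j => pvH grid done j) := by
          rw [hfil]; exact List.mem_cons_self ..
        have hj0p := (mem_hs_iff grid m done j0).1 hj0mem
        refine ih (done + 1) _ _ _ st' rfl (by omega) (by omega) ?_ hrun
        apply invSucc grid n m done rows cols counter _ _ _
          ⟨hL1, hL2, hL3, hL4, hL5, hL6, hL7, hL8, hL9⟩ hd0 hlt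
          (fun j => by rw [← hfil]; exact mem_hs_iff grid m done j)
          (List.cons_ne_nil _ _)
        · -- 0 < v
          by_cases h : gI cols j0 = 0
          · rw [if_pos h]; omega
          · rw [if_neg h]; have := (hL6 j0 hj0p.1).1; omega
        · -- v < counter'
          by_cases h : gI cols j0 = 0
          · rw [if_pos h, if_pos h]; omega
          · rw [if_neg h, if_neg h]; have := (hL6 j0 hj0p.1).2; omega
        · -- counter ≤ counter'
          by_cases h : gI cols j0 = 0
          · rw [if_pos h]; omega
          · rw [if_neg h]
        · -- labels of hs in {0, v}
          intro j hj
          rcases List.mem_cons.1 hj with rfl | hjr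
          · by_cases h : gI cols j = 0
            · exact Or.inl h
            · rw [if_neg h]; exact Or.inr rfl
          · have := List.all_eq_true.1 hcond j hjr
            rcases Bool.or_eq_true_iff.1 this with h | h
            · exact Or.inl (by simpa using h)
            · exact Or.inr (by simpa using h)
      · rw [if_neg hcond] at hrun
        exact absurd hrun (by simp)

-- inj preservation when row `done` adopts label v
theorem injSucc (grid : List (List String)) (n m done : Int) (rows cols : List Int)
    (counter v : Int)
    (hInv : pvInv grid n m done rows cols counter)
    (hinj : pvInj grid m done rows) (hP : pvP n m grid)
    (hd0 : 0 ≤ done) (hdn : done < n)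
    (hcase : v = counter ∨ (∃ j0, 0 ≤ j0 ∧ j0 < m ∧ pvH grid done j0 = true ∧ gI cols j0 = v)) :
    pvInj grid m (done + 1) (PySem.List.pySetD rows done v) := by
  obtain ⟨hL1, hL2, hL3, hL4, hL5, hL6, hL7, hL8, hL9⟩ := hInv
  have hdl : done < (rows.length : Int) := by rw [hL1]; omega
  have hrow : ∀ i, 0 ≤ i → gI (PySem.List.pySetD rows done v) i
      = if i = done then v else gI rows i := by
    intro i hi
    by_cases h : i = done
    · subst h; simp [gI_set_eq rows i v hd0 hdl]
    · simp [h, gI_set_ne rows done v i hd0 hi h]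
  -- key: any older row with label v has the same pattern as row `done`
  have hkey : ∀ i, 0 ≤ i → i < done → gI rows i = v → v ≠ 0 →
      pvPat grid m i = pvPat grid m done := by
    intro i hi hid hri hv0
    rcases hcase with rfl | ⟨j0, hj00, hj0m, hH0, hc0⟩
    · exact absurd hri (by have := (hL5 i hi).2; omega)
    · have hc8 : gI cols j0 ≠ 0 := by rw [hc0]; exact hv0
      obtain ⟨i0, hi00, hi0d, hHi0⟩ := (hL8 j0 hj00 hj0m).1 hc8
      have hri0 : gI rows i0 = v := by rw [← hL9 i0 j0 hi00 hi0d hj00 hj0m hHi0, hc0]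
      have h1 : pvPat grid m i = pvPat grid m i0 :=
        hinj i i0 hi hid hi00 hi0d (by rw [hri, hri0]) (by rw [hri]; exact hv0)
      have h2 : pvPat grid m i0 = pvPat grid m done :=
        hP i0 done j0 hi00 (by omega) hd0 hdn hj00 hj0m hHi0 hH0
      rw [h1, h2]
  intro i1 i2 hi1 hi1d hi2 hi2d heq hne0
  rw [hrow i1 hi1, hrow i2 hi2] at heq
  rw [hrow i1 hi1] at hne0
  by_cases h1 : i1 = done <;> by_cases h2 : i2 = done
  · rw [h1, h2]
  · -- i1 = done, i2 < done
    rw [if_pos h1] at heq hne0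
    rw [if_neg h2] at heq
    rw [h1]
    exact (hkey i2 hi2 (by omega) heq.symm hne0).symm
  · rw [if_neg h1] at heq hne0
    rw [if_pos h2] at heq
    rw [h2]
    exact hkey i1 hi1 (by omega) heq (by rw [← heq]; exact hne0)
  · rw [if_neg h1] at heq hne0
    rw [if_neg h2] at heq
    exact hinj i1 i2 hi1 (by omega) hi2 (by omega) heq hne0

theorem loopI_P (grid : List (List String)) (n m : Int) (hP : pvP n m grid) :
    ∀ (is : List Int) (done : Int) (rows cols : List Int) (counter : Int),
      is = PySem.List.pyRange done n 1 → 0 ≤ done → done ≤ n →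
      pvInv grid n m done rows cols counter →
      pvInj grid m done rows →
      ∃ rows' cols' counter',
        pvLoopI grid m is (rows, cols, counter) = some (rows', cols', counter') ∧
        pvInv grid n m n rows' cols' counter' ∧ pvInj grid m n rows' := by
  intro is
  induction is with
  | nil =>
    intro done rows cols counter hrange hd0 hdn hInv hinj
    have hnd : n ≤ done := by
      by_contra h
      rw [PySem.List.pyRange_one_cons (by omega)] at hrange
      exact List.cons_ne_nil _ _ hrange.symm
    have : done = n := by omega
    subst this
    exact ⟨rows, cols, counter, rfl, hInv, hinj⟩
  | cons i is ih =>
    intro done rows cols counter hrange hd0 hdn hInv hinj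
    have hlt : done < n := by
      by_contra h
      rw [PySem.List.pyRange_one_eq_nil (by omega)] at hrange
      exact List.cons_ne_nil _ _ hrange
    rw [PySem.List.pyRange_one_cons hlt] at hrange
    have h12 := List.cons_eq_cons.1 hrange
    have h1 : i = done := h12.1
    have h2 : is = PySem.List.pyRange (done + 1) n 1 := h12.2
    subst h2
    have hrow := rowSetup grid n m done rows cols counter hInv hd0 hlt
    obtain ⟨hL1, hL2, hL3, hL4, hL5, hL6, hL7, hL8, hL9⟩ := hInv
    cases hfil : (PySem.List.pyRange 0 m 1).filter (fun j => pvH grid done j) with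
    | nil =>
      have hemp : ∀ j, 0 ≤ j → j < m → pvH grid done j = false := by
        intro j hj0 hjm
        by_contra h
        have : j ∈ (PySem.List.pyRange 0 m 1).filter (fun j => pvH grid done j) :=
          (mem_hs_iff grid m done j).2 ⟨hj0, hjm, by simpa using h⟩
        rw [hfil] at this
        exact absurd this (List.not_mem_nil)
      have hinj' : pvInj grid m (done + 1) rows := by
        intro i1 i2 hi1 hi1d hi2 hi2d heq hne0
        by_cases hc1 : i1 = done
        · exfalso; rw [hc1, hL4 done (le_refl done)] at hne0; exact hne0 rfl
        · by_cases hc2 : i2 = done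
          · exfalso; rw [hc2, hL4 done (le_refl done)] at heq; rw [heq] at hne0; exact hne0 rfl
          · exact hinj i1 i2 hi1 (by omega) hi2 (by omega) heq hne0
      obtain ⟨rows', cols', counter', hrun, hI, hJ⟩ := ih (done + 1) rows cols counter rfl
        (by omega) (by omega)
        (invSkip grid n m done rows cols counter ⟨hL1, hL2, hL3, hL4, hL5, hL6, hL7, hL8, hL9⟩ hd0 hemp)
        hinj'
      refine ⟨rows', cols', counter', ?_, hI, hJ⟩
      simp only [pvLoopI, h1, hrow, hfil]
      exact hrun
    | cons j0 rest =>
      have hj0mem : j0 ∈ (PySem.List.pyRange 0 m 1).filter (fun j => pvH grid done j) := by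
        rw [hfil]; exact List.mem_cons_self ..
      have hj0p := (mem_hs_iff grid m done j0).1 hj0mem
      -- under P the compatibility test always passes
      have hcond : (rest.all (fun j => gI cols j == 0 ||
          gI cols j == if gI cols j0 = 0 then counter else gI cols j0)) = true := by
        rw [List.all_eq_true]
        intro j hjr
        have hjmem : j ∈ (PySem.List.pyRange 0 m 1).filter (fun j => pvH grid done j) := by
          rw [hfil]; exact List.mem_cons_of_mem _ hjr
        have hjp := (mem_hs_iff grid m done j).1 hjmem
        by_cases hz : gI cols j = 0
        · simp [hz]
        · obtain ⟨i1, hi10, hi1d, hHi1⟩ := (hL8 j hjp.1 hjp.2.1).1 hz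
          have hpat1 : pvPat grid m i1 = pvPat grid m done :=
            hP i1 done j hi10 (by omega) hd0 hlt hjp.1 hjp.2.1 hHi1 hjp.2.2
          have hHj0i1 : pvH grid i1 j0 = true := by
            rw [(pat_eq_iff grid m i1 done).1 hpat1 j0 hj0p.1 hj0p.2.1]
            exact hj0p.2.2
          have hcj0 : gI cols j0 = gI rows i1 :=
            hL9 i1 j0 hi10 hi1d hj0p.1 hj0p.2.1 hHj0i1
          have hcj : gI cols j = gI rows i1 :=
            hL9 i1 j hi10 hi1d hjp.1 hjp.2.1 hHi1
          have hj0nz : gI cols j0 ≠ 0 := by rw [hcj0, ← hcj]; exact hz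
          rw [if_neg hj0nz]
          simp [hcj, hcj0]
      -- the written label v
      set v := if gI cols j0 = 0 then counter else gI cols j0 with hv
      have hvpos : 0 < v := by
        by_cases h : gI cols j0 = 0
        · rw [hv, if_pos h]; omega
        · rw [hv, if_neg h]; have := (hL6 j0 hj0p.1).1; omega
      have hInv' : pvInv grid n m (done + 1) (PySem.List.pySetD rows done v)
          (pvSetAll cols (j0 :: rest) v) (if gI cols j0 = 0 then counter + 1 else counter) := by
        apply invSucc grid n m done rows cols counter _ _ _
          ⟨hL1, hL2, hL3, hL4, hL5, hL6, hL7, hL8, hL9⟩ hd0 hlt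
          (fun j => by rw [← hfil]; exact mem_hs_iff grid m done j)
          (List.cons_ne_nil _ _) hvpos
        · by_cases h : gI cols j0 = 0
          · rw [if_pos h, hv, if_pos h]; omega
          · rw [if_neg h, hv, if_neg h]; have := (hL6 j0 hj0p.1).2; omega
        · by_cases h : gI cols j0 = 0
          · rw [if_pos h]; omega
          · rw [if_neg h]
        · intro j hj
          rcases List.mem_cons.1 hj with rfl | hjr
          · by_cases h : gI cols j = 0
            · exact Or.inl h
            · rw [hv, if_neg h]; exact Or.inr rfl
          · have := List.all_eq_true.1 hcond j hjr
            rcases Bool.or_eq_true_iff.1 this with h | h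
            · exact Or.inl (by simpa using h)
            · exact Or.inr (by simpa using h)
      have hinj' : pvInj grid m (done + 1) (PySem.List.pySetD rows done v) := by
        apply injSucc grid n m done rows cols counter v
          ⟨hL1, hL2, hL3, hL4, hL5, hL6, hL7, hL8, hL9⟩ hinj hP hd0 hlt
        by_cases h : gI cols j0 = 0
        · exact Or.inl (by rw [hv, if_pos h])
        · exact Or.inr ⟨j0, hj0p.1, hj0p.2.1, hj0p.2.2, by rw [hv, if_neg h]⟩
      obtain ⟨rows', cols', counter', hrun, hI, hJ⟩ := ih (done + 1) _ _ _ rfl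
        (by omega) (by omega) hInv' hinj'
      refine ⟨rows', cols', counter', ?_, hI, hJ⟩
      simp only [pvLoopI, h1, hrow, hfil]
      rw [if_pos hcond]
      exact hrun

theorem mem_findInArray (c : Int) (arr : List Int) (i : Int) :
    i ∈ findInArray c arr ↔ (0 ≤ i ∧ i < (arr.length : Int)) ∧ gI arr i = c := by
  unfold findInArray
  rw [PySem.List.foldl_append_if_eq_filter]
  rw [List.nil_append, List.mem_filter, PySem.List.mem_pyRange_one]
  simp [gI]

theorem phase2_cases (grid : List (List String)) (rows cols : List Int) (cs : List Int) :
    pvPhase2A grid rows cols cs = "Yes" ∨ pvPhase2A grid rows cols cs = "No" := by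
  induction cs with
  | nil => left; rfl
  | cons c cs ih =>
    simp only [pvPhase2A]
    split
    · right; rfl
    · exact ih

theorem phase2_yes_iff (grid : List (List String)) (rows cols : List Int) (cs : List Int) :
    pvPhase2A grid rows cols cs = "Yes" ↔
      ∀ c ∈ cs, ∀ i ∈ findInArray c rows, ∀ j ∈ findInArray c cols,
        pvH grid i j = true := by
  induction cs with
  | nil => simp [pvPhase2A]
  | cons c cs ih =>
    simp only [pvPhase2A]
    split
    · rename_i hany
      constructor
      · intro h; exact absurd h (by decide)
      · intro h
        exfalso
        obtain ⟨i, hi, hin⟩ := List.any_eq_true.1 hany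
        obtain ⟨j, hj, hjn⟩ := List.any_eq_true.1 hin
        have := h c (List.mem_cons_self ..) i hi j hj
        simp [pvH] at this
        simp [this] at hjn
    · rename_i hany
      rw [ih]
      constructor
      · intro h
        intro c' hc'
        rcases List.mem_cons.1 hc' with rfl | hc''
        · intro i hi j hj
          by_contra hne
          apply hany
          rw [List.any_eq_true]
          refine ⟨i, hi, ?_⟩
          rw [List.any_eq_true]
          refine ⟨j, hj, ?_⟩
          simp only [pvH] at hne
          simp [hne]
        · exact h c' hc''
      · intro h c' hc'
        exact h c' (List.mem_cons_of_mem _ hc')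

theorem colCheck_cases (pats : List (List Bool)) (js : List Int) :
    pvColCheck pats js = "Yes" ∨ pvColCheck pats js = "No" := by
  induction js with
  | nil => left; rfl
  | cons j js ih =>
    simp only [pvColCheck]
    split
    · exact ih
    · split
      · right; rfl
      · exact ih

theorem colCheck_yes_iff (pats : List (List Bool)) (js : List Int) :
    pvColCheck pats js = "Yes" ↔
      ∀ j ∈ js, ∀ p ∈ pats.filter (fun p => PySem.List.pyGetD p j false),
        ∀ q ∈ pats.filter (fun p => PySem.List.pyGetD p j false), p = q := by
  induction js with
  | nil => simp [pvColCheck]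
  | cons j js ih =>
    simp only [pvColCheck]
    split
    · rename_i hfil
      rw [ih]
      constructor
      · intro h c' hc'
        rcases List.mem_cons.1 hc' with rfl | hc''
        · intro p hp; rw [hfil] at hp; exact absurd hp (List.not_mem_nil)
        · exact h c' hc''
      · intro h c' hc'
        exact h c' (List.mem_cons_of_mem _ hc')
    · rename_i h hd tl hfil
      split
      · rename_i hany
        constructor
        · intro hcon; exact absurd hcon (by decide)
        · intro hcon
          exfalso
          obtain ⟨p, hp, hpn⟩ := List.any_eq_true.1 hany
          have hhd : hd ∈ pats.filter (fun p => PySem.List.pyGetD p j false) := by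
            rw [hfil]; exact List.mem_cons_self ..
          rw [hfil] at hp
          have := hcon j (List.mem_cons_self ..) p (by rw [hfil]; exact hp) hd hhd
          simp [this] at hpn
      · rename_i hany
        rw [ih]
        constructor
        · intro hrec c' hc'
          rcases List.mem_cons.1 hc' with rfl | hc''
          · intro p hp q hq
            have hall : ∀ r ∈ pats.filter (fun p => PySem.List.pyGetD p c' false), r = hd := by
              intro r hr
              by_contra hne
              apply hany
              rw [List.any_eq_true]
              exact ⟨r, hr, by simp [hne]⟩
            rw [hall p hp, hall q hq]
          · exact hrec c' hc''
        · intro hcon c' hc'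
          exact hcon c' (List.mem_cons_of_mem _ hc')

theorem mem_hits_iff (grid : List (List String)) (n m j : Int) (p : List Bool)
    (hj0 : 0 ≤ j) (hjm : j < m) :
    p ∈ ((PySem.List.pyRange 0 n 1).map (pvPat grid m)).filter
        (fun p => PySem.List.pyGetD p j false) ↔
      ∃ i, (0 ≤ i ∧ i < n) ∧ p = pvPat grid m i ∧ pvH grid i j = true := by
  rw [List.mem_filter, List.mem_map]
  constructor
  · rintro ⟨⟨i, hi, rfl⟩, hget⟩
    rw [gI_pat grid m i j hj0 hjm] at hget
    exact ⟨i, PySem.List.mem_pyRange_one.1 hi, rfl, hget⟩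
  · rintro ⟨i, hi, rfl, hH⟩
    refine ⟨⟨i, PySem.List.mem_pyRange_one.2 hi, rfl⟩, ?_⟩
    rw [gI_pat grid m i j hj0 hjm]
    exact hH

theorem alt_yes_iff (n m : Int) (grid : List (List String)) :
    can_achieve_grid_alt n m grid = "Yes" ↔ pvP n m grid := by
  unfold can_achieve_grid_alt
  rw [colCheck_yes_iff]
  constructor
  · intro h i1 i2 j hi10 hi1n hi20 hi2n hj0 hjm hH1 hH2
    exact h j (PySem.List.mem_pyRange_one.2 ⟨hj0, hjm⟩)
      (pvPat grid m i1) ((mem_hits_iff grid n m j _ hj0 hjm).2 ⟨i1, ⟨hi10, hi1n⟩, rfl, hH1⟩)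
      (pvPat grid m i2) ((mem_hits_iff grid n m j _ hj0 hjm).2 ⟨i2, ⟨hi20, hi2n⟩, rfl, hH2⟩)
  · intro hP j hj p hp q hq
    obtain ⟨hj0, hjm⟩ := PySem.List.mem_pyRange_one.1 hj
    obtain ⟨i1, hi1, rfl, hH1⟩ := (mem_hits_iff grid n m j _ hj0 hjm).1 hp
    obtain ⟨i2, hi2, rfl, hH2⟩ := (mem_hits_iff grid n m j _ hj0 hjm).1 hq
    exact hP i1 i2 j hi1.1 hi1.2 hi2.1 hi2.2 hj0 hjm hH1 hH2

theorem inv_init (grid : List (List String)) (n m : Int) :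
    pvInv grid n m 0 (List.replicate n.toNat 0) (List.replicate m.toNat 0) 1 := by
  refine ⟨List.length_replicate, List.length_replicate, le_refl 1,
    fun i _ => gI_replicate _ _, ?_, ?_, ?_, ?_, ?_⟩
  · intro i _; rw [gI_replicate]; omega
  · intro j _; rw [gI_replicate]; omega
  · intro i hi hid; omega
  · intro j hj hjm
    rw [gI_replicate]
    constructor
    · intro h; exact absurd rfl h
    · rintro ⟨i, hi0, hid, _⟩; omega
  · intro i j hi hid; omega

theorem A_yes_iff (n m : Int) (grid : List (List String)) :
    can_achieve_grid n m grid = "Yes" ↔ pvP n m grid := by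
  by_cases hn : n ≤ 0
  · -- no rows: A returns Yes and P is vacuous
    have hP : pvP n m grid := by intro i1 i2 j h1 h2; omega
    unfold can_achieve_grid
    rw [PySem.List.pyRange_one_eq_nil hn]
    simp only [pvLoopI]
    rw [PySem.List.pyRange_one_eq_nil (by omega)]
    simp [pvPhase2A, hP]
  · replace hn : 0 < n := by omega
    constructor
    · -- forward: A = Yes implies P
      intro hyes
      unfold can_achieve_grid at hyes
      cases hrun : pvLoopI grid m (PySem.List.pyRange 0 n 1)
          (List.replicate n.toNat 0, List.replicate m.toNat 0, 1) with
      | none => rw [hrun] at hyes; simp at hyes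
      | some st' =>
        obtain ⟨rows', cols', counter'⟩ := st'
        rw [hrun] at hyes
        have hInv : pvInv grid n m n rows' cols' counter' :=
          loopI_some grid n m (PySem.List.pyRange 0 n 1) 0
            (List.replicate n.toNat 0) (List.replicate m.toNat 0) 1 (rows', cols', counter')
            rfl (le_refl 0) (by omega) (inv_init grid n m) hrun
        obtain ⟨hL1, hL2, hL3, hL4, hL5, hL6, hL7, hL8, hL9⟩ := hInv
        rw [phase2_yes_iff] at hyes
        intro i1 i2 j hi10 hi1n hi20 hi2n hj0 hjm hH1 hH2
        have hm0 : 0 < m := by omega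
        have hr1 : gI rows' i1 ≠ 0 := (hL7 i1 hi10 hi1n).2 ⟨j, hj0, hjm, hH1⟩
        have hr2 : gI rows' i2 ≠ 0 := (hL7 i2 hi20 hi2n).2 ⟨j, hj0, hjm, hH2⟩
        have hc1 : gI cols' j = gI rows' i1 := hL9 i1 j hi10 hi1n hj0 hjm hH1
        have hc2 : gI cols' j = gI rows' i2 := hL9 i2 j hi20 hi2n hj0 hjm hH2
        have heq : gI rows' i1 = gI rows' i2 := by rw [← hc1, hc2]
        -- both rows carry label c; phase-2 success forces equal patterns
        rw [pat_eq_iff]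
        intro j' hj'0 hj'm
        have key : ∀ a b : Int, 0 ≤ a → a < n → 0 ≤ b → b < n →
            gI rows' a = gI rows' b → pvH grid a j' = true → pvH grid b j' = true := by
          intro a b ha0 han hb0 hbn hab hHa
          have hca : gI cols' j' = gI rows' a := hL9 a j' ha0 han hj'0 hj'm hHa
          have hcne : gI rows' a ≠ 0 := (hL7 a ha0 han).2 ⟨j', hj'0, hj'm, hHa⟩
          have hcmem : gI rows' a ∈ PySem.List.pyRange 1 counter' 1 := by
            rw [PySem.List.mem_pyRange_one]
            have := hL5 a ha0
            omega
          apply hyes (gI rows' a) hcmem b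
          · rw [mem_findInArray]
            refine ⟨⟨hb0, ?_⟩, hab.symm⟩
            rw [hL1]; omega
          · rw [mem_findInArray]
            refine ⟨⟨hj'0, ?_⟩, hca⟩
            rw [hL2]; omega
        by_cases h1 : pvH grid i1 j' = true
        · rw [h1, key i1 i2 hi10 hi1n hi20 hi2n heq h1]
        · by_cases h2 : pvH grid i2 j' = true
          · exact absurd (key i2 i1 hi20 hi2n hi10 hi1n heq.symm h2) h1
          · rw [Bool.not_eq_true] at h1 h2; rw [h1, h2]
    · -- backward: P implies A = Yes
      intro hP
      obtain ⟨rows', cols', counter', hrun, hInv, hInj⟩ :=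
        loopI_P grid n m hP (PySem.List.pyRange 0 n 1) 0
          (List.replicate n.toNat 0) (List.replicate m.toNat 0) 1
          rfl (le_refl 0) (by omega) (inv_init grid n m)
          (by intro i1 i2 h1 h2; omega)
      unfold can_achieve_grid
      rw [hrun]
      obtain ⟨hL1, hL2, hL3, hL4, hL5, hL6, hL7, hL8, hL9⟩ := hInv
      rw [phase2_yes_iff]
      intro c hc i hi j hj
      rw [mem_findInArray] at hi hj
      obtain ⟨⟨hi0, hil⟩, hic⟩ := hi
      obtain ⟨⟨hj0, hjl⟩, hjc⟩ := hj
      have hcn : 1 ≤ c := (PySem.List.mem_pyRange_one.1 hc).1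
      have hin : i < n := by rw [hL1] at hil; omega
      have hjm : j < m := by rw [hL2] at hjl; omega
      have hcnz : gI cols' j ≠ 0 := by rw [hjc]; omega
      obtain ⟨i1, hi10, hi1n, hHi1⟩ := (hL8 j hj0 hjm).1 hcnz
      have hri1 : gI rows' i1 = c := by
        rw [← hL9 i1 j hi10 hi1n hj0 hjm hHi1, hjc]
      have hpat : pvPat grid m i1 = pvPat grid m i :=
        hInj i1 i hi10 hi1n hi0 hin (by rw [hri1, hic]) (by rw [hri1]; omega)
      rw [← (pat_eq_iff grid m i1 i).1 hpat j hj0 hjm]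
      exact hHi1

theorem A_cases (n m : Int) (grid : List (List String)) :
    can_achieve_grid n m grid = "Yes" ∨ can_achieve_grid n m grid = "No" := by
  unfold can_achieve_grid
  cases pvLoopI grid m (PySem.List.pyRange 0 n 1)
      (List.replicate n.toNat 0, List.replicate m.toNat 0, 1) with
  | none => right; rfl
  | some st' => obtain ⟨rows', cols', counter'⟩ := st'; exact phase2_cases grid rows' cols' _

theorem final_eq (n m : Int) (grid : List (List String)) :
    can_achieve_grid n m grid = can_achieve_grid_alt n m grid := by
  by_cases hP : pvP n m grid
  · rw [(A_yes_iff n m grid).2 hP, (alt_yes_iff n m grid).2 hP]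
  · have hA : can_achieve_grid n m grid = "No" := by
      rcases A_cases n m grid with h | h
      · exact absurd ((A_yes_iff n m grid).1 h) hP
      · exact h
    have hB : can_achieve_grid_alt n m grid = "No" := by
      rcases colCheck_cases ((PySem.List.pyRange 0 n 1).map (pvPat grid m))
          (PySem.List.pyRange 0 m 1) with h | h
      · exact absurd ((alt_yes_iff n m grid).1 h) hP
      · exact h
    rw [hA, hB]

-- ===== VERDICT (by name: the statement is the Claim_ definition above) =====
theorem can_achieve_grid_spec : Claim_equal_can_achieve_grid := by
  intro n m grid _ _
  unfold Spec_can_achieve_grid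
  exact final_eq n m grid
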